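-- pv_equiv track=rewrite | github.com/in0ig/ChatA | backend/tests/unit/test_api_routes.py | _paths_match
-- ===== SOURCE A (Python) =====
-- def _paths_match(actual_path: str, expected_path: str) -> bool:
--     """检查实际路径是否匹配期望路径（考虑参数占位符）"""
--     actual_segments = actual_path.split('/')
--     expected_segments = expected_path.split('/')
--
--     if len(actual_segments) != len(expected_segments):
--         return False
--
--     for actual, expected in zip(actual_segments, expected_segments):
--         if expected.startswith('{') and expected.endswith('}'):
--             # 期望的是参数，实际的也应该是参数
--             if not (actual.startswith('{') and actual.endswith('}')):
--                 return False
--         else: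
--             # 期望的是固定字符串，应该完全匹配
--             if actual != expected:
--                 return False
--
--     return True
-- ===== SOURCE B (Python) =====
-- def _paths_match(actual_path: str, expected_path: str) -> bool:
--     def key(path):
--         return [(True, None) if seg.startswith('{') and seg.endswith('}') else (False, seg)
--                 for seg in path.split('/')]
--     return key(actual_path) == key(expected_path)
-- ===== Notes on version B (the rewrite author's own statement) =====
-- stated objective: simpler
-- what changed: Replaces the length check plus early-exit pairwise zip loop by canonicalising each path into a signature list (placeholder marker vs literal segment) and comparing the two lists once.
import Mathlib
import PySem

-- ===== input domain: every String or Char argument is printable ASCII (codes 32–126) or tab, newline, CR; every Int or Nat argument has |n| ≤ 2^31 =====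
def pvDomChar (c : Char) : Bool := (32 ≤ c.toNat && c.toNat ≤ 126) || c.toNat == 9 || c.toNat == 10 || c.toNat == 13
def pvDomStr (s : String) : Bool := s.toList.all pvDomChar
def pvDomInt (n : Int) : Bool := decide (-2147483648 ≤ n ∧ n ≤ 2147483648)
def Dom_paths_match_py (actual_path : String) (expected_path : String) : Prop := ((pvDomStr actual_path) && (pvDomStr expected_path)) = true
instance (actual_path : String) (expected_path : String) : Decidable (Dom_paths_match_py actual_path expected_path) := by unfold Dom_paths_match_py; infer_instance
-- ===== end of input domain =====

-- B replaces the length check plus early-exit pairwise loop by canonicalising each path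
-- into a signature list and comparing the two lists once (objective: simpler).

-- ===== PORT A =====
-- 'seg.startswith("{") and seg.endswith("}")'
def pmIsParam (seg : List Char) : Bool :=
  PySem.Chars.startswith seg ['{'] && PySem.Chars.endswith seg ['}']

-- the 'for actual, expected in zip(...)' loop with its early returns
def pmLoopA : List (List Char) → List (List Char) → Bool
  | a :: as, e :: es =>
    if pmIsParam e then
      if !(pmIsParam a) then false else pmLoopA as es
    else
      if a ≠ e then false else pmLoopA as es
  | _, _ => true

def paths_match_py (actual_path : String) (expected_path : String) : Bool :=
  let actual_segments := PySem.Chars.splitOn actual_path.toList ['/']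
  let expected_segments := PySem.Chars.splitOn expected_path.toList ['/']
  if actual_segments.length ≠ expected_segments.length then false
  else pmLoopA actual_segments expected_segments

-- ===== PORT B =====
-- canonical signature of one path: placeholder marker vs literal segment
def pmKey (path : List Char) : List (Bool × Option (List Char)) :=
  (PySem.Chars.splitOn path ['/']).map (fun seg =>
    if PySem.Chars.startswith seg ['{'] && PySem.Chars.endswith seg ['}'] then
      (true, none)
    else
      (false, some seg))

def paths_match_py_alt (actual_path : String) (expected_path : String) : Bool :=
  pmKey actual_path.toList == pmKey expected_path.toList

-- ===== PRECONDITION & SPEC =====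
def Spec_paths_match_py (actual_path : String) (expected_path : String) (out : Bool) : Prop := out = paths_match_py_alt actual_path expected_path
instance (actual_path : String) (expected_path : String) (out : Bool) : Decidable (Spec_paths_match_py actual_path expected_path out) := by unfold Spec_paths_match_py; infer_instance

-- ===== CLAIM (what is proved, stated in full; the proofs are below) =====
def Claim_equal_paths_match_py : Prop := ∀ (actual_path : String) (expected_path : String), Dom_paths_match_py actual_path expected_path → Spec_paths_match_py actual_path expected_path (paths_match_py actual_path expected_path)

-- ===== LEMMAS AND PROOFS =====

-- the segment-wise comparison: A's loop (guarded by the length check) equals B's key comparison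
theorem pmLoop_eq_key (as es : List (List Char)) :
    (if as.length ≠ es.length then false else pmLoopA as es)
      = ((as.map (fun seg =>
            if pmIsParam seg then ((true, none) : Bool × Option (List Char))
            else (false, some seg)))
          == (es.map (fun seg =>
            if pmIsParam seg then ((true, none) : Bool × Option (List Char))
            else (false, some seg)))) := by
  induction as generalizing es with
  | nil => cases es <;> simp [pmLoopA]
  | cons a as ih =>
    cases es with
    | nil => simp
    | cons e es =>
      have ih' := ih es
      simp only [ne_eq] at ih'
      cases hpa : pmIsParam a <;> cases hpe : pmIsParam e
      · by_cases hae : a = e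
        · subst hae
          simp only [List.map_cons, List.length_cons, pmLoopA, hpe, Bool.false_eq_true,
            if_false, ne_eq, not_true_eq_false, List.cons_beq_cons]
          simp [ih']
        · simp [pmLoopA, hpe, hpa, hae]
      · simp [pmLoopA, hpe, hpa]
      · by_cases hae : a = e
        · subst hae; rw [hpa] at hpe; exact absurd hpe (by simp)
        · simp [pmLoopA, hpe, hpa, hae]
      · simp only [List.map_cons, List.length_cons, pmLoopA, hpe, hpa, if_true,
          Bool.not_true, Bool.false_eq_true, if_false, ne_eq, List.cons_beq_cons]
        simp [ih']

-- ===== VERDICT (by name: the statement is the Claim_ definition above) =====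
theorem paths_match_py_spec : Claim_equal_paths_match_py := by
  intro actual_path expected_path _
  show paths_match_py actual_path expected_path = paths_match_py_alt actual_path expected_path
  unfold paths_match_py paths_match_py_alt pmKey
  exact pmLoop_eq_key _ _
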